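-- pv_equiv track=rewrite | github.com/tohidabedini/quantstats | quantstats/stats.py | find_falling_sequences
-- ===== SOURCE A (Python) =====
-- def find_falling_sequences(prices_list, reverse=False):
--     falling_sequences = []
--     current_sequence = []
--
--     for value in prices_list:
--         if not current_sequence or value < current_sequence[-1]:
--             current_sequence.append(value)
--         else:
--             if len(current_sequence) > 1:
--                 if reverse:
--                     current_sequence.reverse()
--                 falling_sequences.append(current_sequence)
--             current_sequence = [value]
--
--     if len(current_sequence) > 1:
--         if reverse:
--             current_sequence.reverse()
--         falling_sequences.append(current_sequence)
--
--     return falling_sequences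
-- ===== SOURCE B (Python) =====
-- def _split_run(xs):
--     # xs nonempty: return (maximal strictly decreasing prefix, remaining suffix)
--     k = 1
--     while k < len(xs) and xs[k] < xs[k - 1]:
--         k += 1
--     return xs[:k], xs[k:]
--
--
-- def find_falling_sequences(prices_list, reverse=False):
--     out = []
--     xs = prices_list
--     while xs:
--         run, xs = _split_run(xs)
--         if len(run) > 1:
--             out.append(run[::-1] if reverse else run)
--     return out
-- ===== Notes on version B (the rewrite author's own statement) =====
-- stated objective: alternative
-- what changed: B splits the list into maximal strictly-decreasing runs with a separate chunk-splitting helper and a loop over whole runs, instead of A's single element-wise loop mutating a current-sequence accumulator.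
import Mathlib
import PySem

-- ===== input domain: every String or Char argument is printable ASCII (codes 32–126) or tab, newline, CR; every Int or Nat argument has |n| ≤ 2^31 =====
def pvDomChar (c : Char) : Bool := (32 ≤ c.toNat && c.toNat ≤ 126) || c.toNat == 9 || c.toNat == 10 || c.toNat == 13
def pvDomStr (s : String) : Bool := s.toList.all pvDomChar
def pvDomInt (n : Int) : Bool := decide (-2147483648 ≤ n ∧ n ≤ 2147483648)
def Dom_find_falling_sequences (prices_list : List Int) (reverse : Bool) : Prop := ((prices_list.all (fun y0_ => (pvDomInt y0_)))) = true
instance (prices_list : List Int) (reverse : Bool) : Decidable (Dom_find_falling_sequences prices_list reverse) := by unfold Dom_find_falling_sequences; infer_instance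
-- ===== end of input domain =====

-- B splits the input into maximal strictly-decreasing runs with a separate splitting
-- helper and loops over whole runs, instead of A's element-wise accumulator loop
-- (objective: alternative decomposition, same cost).


-- ===== PORT A =====
-- one loop iteration: `if not current_sequence or value < current_sequence[-1]: … else: …`
def ffsStep (reverse : Bool) (st : List (List Int) × List Int) (value : Int) :
    List (List Int) × List Int :=
  let acc := st.1
  let cur := st.2
  if cur.isEmpty || (match cur.getLast? with | some l => decide (value < l) | none => false) then
    (acc, cur ++ [value])
  else
    if cur.length > 1 then
      (acc ++ [if reverse then cur.reverse else cur], [value])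
    else
      (acc, [value])

def find_falling_sequences (prices_list : List Int) (reverse : Bool) : List (List Int) :=
  let st := prices_list.foldl (ffsStep reverse) ([], [])
  -- final flush after the loop
  if st.2.length > 1 then st.1 ++ [if reverse then st.2.reverse else st.2] else st.1

-- ===== PORT B =====
-- `_split_run`: maximal strictly-decreasing prefix and the remaining suffix
def splitRun : List Int → List Int × List Int
  | [] => ([], [])
  | [x] => ([x], [])
  | x :: y :: rest =>
    if y < x then
      let p := splitRun (y :: rest)
      (x :: p.1, p.2)
    else
      ([x], y :: rest)

theorem splitRun_snd_length : ∀ (x : Int) (xs : List Int),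
    (splitRun (x :: xs)).2.length ≤ xs.length := by
  intro x xs
  induction xs generalizing x with
  | nil => simp [splitRun]
  | cons y rest ih =>
      simp only [splitRun]
      split
      · exact Nat.le_trans (ih y) (Nat.le_succ _)
      · simp

-- the `while xs:` loop of B
def ffsAltLoop (reverse : Bool) (out : List (List Int)) (xs : List Int) : List (List Int) :=
  match xs with
  | [] => out
  | x :: rest =>
    let p := splitRun (x :: rest)
    ffsAltLoop reverse
      (if p.1.length > 1 then out ++ [if reverse then p.1.reverse else p.1] else out) p.2
  termination_by xs.length
  decreasing_by
    simpa using Nat.lt_succ_of_le (splitRun_snd_length x rest)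

def find_falling_sequences_alt (prices_list : List Int) (reverse : Bool) : List (List Int) :=
  ffsAltLoop reverse [] prices_list

-- ===== PRECONDITION & SPEC =====
def Spec_find_falling_sequences (prices_list : List Int) (reverse : Bool) (out : List (List Int)) : Prop := out = find_falling_sequences_alt prices_list reverse
instance (prices_list : List Int) (reverse : Bool) (out : List (List Int)) : Decidable (Spec_find_falling_sequences prices_list reverse out) := by unfold Spec_find_falling_sequences; infer_instance

-- ===== CLAIM (what is proved, stated in full; the proofs are below) =====
def Claim_equal_find_falling_sequences : Prop := ∀ (prices_list : List Int) (reverse : Bool), Dom_find_falling_sequences prices_list reverse → Spec_find_falling_sequences prices_list reverse (find_falling_sequences prices_list reverse)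

-- ===== LEMMAS AND PROOFS =====

-- the flush performed after A's loop (and inside its else-branch)
def ffsFlush (reverse : Bool) (st : List (List Int) × List Int) : List (List Int) :=
  if st.2.length > 1 then st.1 ++ [if reverse then st.2.reverse else st.2] else st.1

-- a strictly decreasing current sequence splits off entirely when nothing follows
theorem splitRun_chain_nil : ∀ (x : Int) (cur : List Int),
    List.IsChain (· > ·) (x :: cur) → splitRun (x :: cur) = (x :: cur, []) := by
  intro x cur
  induction cur generalizing x with
  | nil => intro _; simp [splitRun]
  | cons y rest ih =>
      intro hch
      rw [List.isChain_cons_cons] at hch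
      simp only [splitRun, if_pos hch.1, ih y hch.2]

-- breaking: the next value does not continue the current sequence
theorem splitRun_chain_break : ∀ (x : Int) (cur : List Int) (v : Int) (xs : List Int),
    List.IsChain (· > ·) (x :: cur) → ¬ v < (x :: cur).getLast (by simp) →
    splitRun ((x :: cur) ++ v :: xs) = (x :: cur, v :: xs) := by
  intro x cur
  induction cur generalizing x with
  | nil =>
      intro v xs _ hv
      simp only [List.getLast_singleton] at hv
      simp [splitRun, hv]
  | cons y rest ih =>
      intro v xs hch hv
      rw [List.isChain_cons_cons] at hch
      have hlast : (x :: y :: rest).getLast (by simp) = (y :: rest).getLast (by simp) := by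
        simp [List.getLast_cons]
      rw [hlast] at hv
      have := ih y v xs hch.2 hv
      simp only [List.cons_append, splitRun, if_pos hch.1] at *
      simp [this]

-- main loop invariant: A's fold from a nonempty strictly decreasing current
-- sequence, followed by the flush, equals B's chunked loop on cur ++ xs
theorem ffs_loop_eq : ∀ (xs : List Int) (reverse : Bool) (x : Int) (cur : List Int)
    (acc : List (List Int)), List.IsChain (· > ·) (x :: cur) →
    ffsFlush reverse (xs.foldl (ffsStep reverse) (acc, x :: cur)) =
      ffsAltLoop reverse acc ((x :: cur) ++ xs) := by
  intro xs
  induction xs with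
  | nil =>
      intro reverse x cur acc hch
      rw [List.foldl_nil, List.append_nil, ffsAltLoop]
      simp only [splitRun_chain_nil x cur hch]
      rw [ffsAltLoop]
      rfl
  | cons v xs' ih =>
      intro reverse x cur acc hch
      rw [List.foldl_cons]
      by_cases hv : v < (x :: cur).getLast (by simp)
      · -- value continues the falling sequence
        have hstep : ffsStep reverse (acc, x :: cur) v = (acc, (x :: cur) ++ [v]) := by
          have hl : (x :: cur).getLast? = some ((x :: cur).getLast (by simp)) :=
            List.getLast?_eq_some_getLast (by simp)
          simp [ffsStep, hl, hv]
        have hch' : List.IsChain (· > ·) ((x :: cur) ++ [v]) := by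
          rw [List.isChain_append]
          refine ⟨hch, List.isChain_singleton _, ?_⟩
          intro a ha b hb
          rw [List.getLast?_eq_some_getLast (show (x :: cur) ≠ [] by simp)] at ha
          simp only [List.head?_cons, Option.mem_def, Option.some.injEq] at ha hb
          subst ha; subst hb; exact hv
        rw [hstep]
        have := ih reverse x (cur ++ [v]) acc (by simpa using hch')
        simpa using this
      · -- value breaks the falling sequence: flush and restart
        have hstep : ffsStep reverse (acc, x :: cur) v =
            (ffsFlush reverse (acc, x :: cur), [v]) := by
          have hl : (x :: cur).getLast? = some ((x :: cur).getLast (by simp)) :=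
            List.getLast?_eq_some_getLast (by simp)
          simp only [ffsStep, ffsFlush, List.isEmpty_cons, hl, Bool.false_or]
          rw [if_neg (by simpa using hv)]
          split <;> rfl
        rw [hstep, ih reverse v [] (ffsFlush reverse (acc, x :: cur)) (List.isChain_singleton _)]
        conv_rhs => rw [List.cons_append, ffsAltLoop]
        simp only [← List.cons_append, splitRun_chain_break x cur v xs' hch hv, ffsFlush]
        rfl

-- ===== VERDICT (by name: the statement is the Claim_ definition above) =====
theorem find_falling_sequences_spec : Claim_equal_find_falling_sequences := by
  intro prices_list reverse _
  unfold Spec_find_falling_sequences find_falling_sequences find_falling_sequences_alt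
  cases prices_list with
  | nil => simp [ffsAltLoop]
  | cons x xs =>
      have h0 : ffsStep reverse ([], []) x = ([], [x]) := by simp [ffsStep]
      rw [List.foldl_cons, h0]
      have := ffs_loop_eq xs reverse x [] [] (List.isChain_singleton _)
      simpa [ffsFlush] using this
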